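-- pv_equiv track=rewrite | github.com/khtkht1001/practicals | prac_03/broken_score.py | process_score
-- ===== SOURCE A (Python) =====
-- def process_score(score):
--     while score > 100 or score < 0:
--         return "Invalid score. (Must be between 0 and 100)"
--     if score >= 90:
--         return "Excellent"
--     elif score >= 50:
--         return "Passable"
--     else:
--         return "Bad"
-- ===== SOURCE B (Python) =====
-- LABELS = ["Bad"] * 5 + ["Passable"] * 4 + ["Excellent"] * 2
--
-- def process_score(score):
--     if 0 <= score <= 100:
--         return LABELS[score // 10]
--     return "Invalid score. (Must be between 0 and 100)"
-- ===== Notes on version B (the rewrite author's own statement) =====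
-- stated objective: alternative
-- what changed: Replaced the threshold comparison chain with an arithmetic bucket lookup: score // 10 indexes a precomputed 11-entry label table, so no threshold comparisons remain.
import Mathlib
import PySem

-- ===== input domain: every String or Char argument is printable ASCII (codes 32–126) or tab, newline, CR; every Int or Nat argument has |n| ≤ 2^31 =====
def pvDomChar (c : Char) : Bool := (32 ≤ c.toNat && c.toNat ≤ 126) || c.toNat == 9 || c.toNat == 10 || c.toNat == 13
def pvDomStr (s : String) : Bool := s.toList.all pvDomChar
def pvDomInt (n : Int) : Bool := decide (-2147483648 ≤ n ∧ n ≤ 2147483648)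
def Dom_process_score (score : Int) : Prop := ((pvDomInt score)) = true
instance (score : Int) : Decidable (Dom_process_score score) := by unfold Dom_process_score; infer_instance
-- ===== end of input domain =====

-- B replaces A's threshold comparison chain with an arithmetic bucket lookup (score // 10 indexes an 11-entry label table); same cost, alternative algorithm.

-- ===== PORT A =====
-- A's 'while … return' executes at most once; ported as the conditional it is.
def process_score (score : Int) : String :=
  if score > 100 ∨ score < 0 then "Invalid score. (Must be between 0 and 100)"
  else if score ≥ 90 then "Excellent"
  else if score ≥ 50 then "Passable"
  else "Bad"

-- ===== PORT B =====
def pvLabels : List String :=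
  List.replicate 5 "Bad" ++ List.replicate 4 "Passable" ++ List.replicate 2 "Excellent"

def process_score_alt (score : Int) : String :=
  if 0 ≤ score ∧ score ≤ 100 then
    -- LABELS[score // 10]; the index is always in range under the guard, so pyGet? is some
    (PySem.List.pyGet? pvLabels (PySem.Int.floordiv score 10)).getD ""
  else "Invalid score. (Must be between 0 and 100)"

-- ===== PRECONDITION & SPEC =====
def Spec_process_score (score : Int) (out : String) : Prop := out = process_score_alt score
instance (score : Int) (out : String) : Decidable (Spec_process_score score out) := by unfold Spec_process_score; infer_instance

-- ===== CLAIM (what is proved, stated in full; the proofs are below) =====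
def Claim_equal_process_score : Prop := ∀ (score : Int), Dom_process_score score → Spec_process_score score (process_score score)

-- ===== LEMMAS AND PROOFS =====

-- ===== VERDICT (by name: the statement is the Claim_ definition above) =====
theorem process_score_spec : Claim_equal_process_score := by
  intro score _
  unfold Spec_process_score
  by_cases h : 0 ≤ score ∧ score ≤ 100
  · obtain ⟨h1, h2⟩ := h
    interval_cases score <;> decide
  · have hA : score > 100 ∨ score < 0 := by omega
    simp [process_score, process_score_alt, hA, h]
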